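-- pv_equiv track=rewrite | github.com/zysszy/TreeGen | predict.py | getlistDeep_all
-- ===== SOURCE A (Python) =====
-- def getlistDeep_all(inputlist):
--     ne = []
--     count = 0
--     for p in inputlist:
--         if p == "^":
--             count -= 1
--             ne.append(count)
--         else:
--             ne.append(count)
--             count += 1
--     return ne
-- ===== SOURCE B (Python) =====
-- def getlistDeep_all(inputlist):
--     # pass 1: inclusive prefix counts of '^' tokens
--     carets = []
--     c = 0
--     for p in inputlist:
--         c += (p == "^")
--         carets.append(c)
--     # pass 2: closed form from position and caret count
--     return [i + 1 - 2 * k if p == "^" else i - 2 * k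
--             for i, (p, k) in enumerate(zip(inputlist, carets))]
-- ===== Notes on version B (the rewrite author's own statement) =====
-- stated objective: alternative
-- what changed: Replaces the single stateful depth-counter loop by a two-pass decomposition: first an inclusive prefix-count of '^' tokens, then a map computing each entry by the closed form i-2k (i+1-2k for '^').
import Mathlib
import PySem

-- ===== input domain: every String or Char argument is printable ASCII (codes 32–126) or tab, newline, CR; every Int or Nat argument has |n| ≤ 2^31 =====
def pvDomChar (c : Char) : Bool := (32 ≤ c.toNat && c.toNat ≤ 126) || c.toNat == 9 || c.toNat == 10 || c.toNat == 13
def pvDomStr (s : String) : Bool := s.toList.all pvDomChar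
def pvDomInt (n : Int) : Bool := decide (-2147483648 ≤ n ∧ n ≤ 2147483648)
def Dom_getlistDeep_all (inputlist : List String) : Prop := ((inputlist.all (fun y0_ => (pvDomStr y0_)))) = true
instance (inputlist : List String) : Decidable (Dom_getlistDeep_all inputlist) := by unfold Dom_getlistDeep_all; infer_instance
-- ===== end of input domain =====

-- B replaces A's single stateful depth-counter loop by a caret-prefix-count pass plus a closed-form map (objective: alternative decomposition).


-- ===== PORT A =====
def getlistDeep_all (inputlist : List String) : List Int :=
  (inputlist.foldl (fun (st : List Int × Int) p =>
      if p = "^" then (st.1 ++ [st.2 - 1], st.2 - 1)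
      else (st.1 ++ [st.2], st.2 + 1)) ([], 0)).1

-- ===== PORT B =====
-- pass 1 of Source B: inclusive prefix counts of '^' tokens (running count c)
def pvCarets : List String → Int → List Int
  | [], _ => []
  | p :: rest, c =>
    let c' := c + (if p = "^" then 1 else 0)
    c' :: pvCarets rest c'

def getlistDeep_all_alt (inputlist : List String) : List Int :=
  ((inputlist.zip (pvCarets inputlist 0)).zipIdx).map
    (fun q => if q.1.1 = "^" then (q.2 : Int) + 1 - 2 * q.1.2 else (q.2 : Int) - 2 * q.1.2)

-- ===== PRECONDITION & SPEC =====
def Spec_getlistDeep_all (inputlist : List String) (out : List Int) : Prop := out = getlistDeep_all_alt inputlist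
instance (inputlist : List String) (out : List Int) : Decidable (Spec_getlistDeep_all inputlist out) := by unfold Spec_getlistDeep_all; infer_instance

-- ===== CLAIM (what is proved, stated in full; the proofs are below) =====
def Claim_equal_getlistDeep_all : Prop := ∀ (inputlist : List String), Dom_getlistDeep_all inputlist → Spec_getlistDeep_all inputlist (getlistDeep_all inputlist)

-- ===== LEMMAS AND PROOFS =====

-- the common spine: A's output from a starting count c
def pvSpine : List String → Int → List Int
  | [], _ => []
  | p :: rest, c =>
    if p = "^" then (c - 1) :: pvSpine rest (c - 1)
    else c :: pvSpine rest (c + 1)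

theorem pvA_foldl (l : List String) : ∀ (acc : List Int) (c : Int),
    (l.foldl (fun (st : List Int × Int) p =>
      if p = "^" then (st.1 ++ [st.2 - 1], st.2 - 1)
      else (st.1 ++ [st.2], st.2 + 1)) (acc, c)).1 = acc ++ pvSpine l c := by
  induction l with
  | nil => intro acc c; simp [pvSpine]
  | cons p rest ih =>
    intro acc c
    by_cases hp : p = "^" <;> simp [pvSpine, hp, List.foldl, ih]

theorem pvB_spine (l : List String) : ∀ (k : Int) (i : Nat),
    (((l.zip (pvCarets l k)).zipIdx i).map
      (fun q => if q.1.1 = "^" then (q.2 : Int) + 1 - 2 * q.1.2 else (q.2 : Int) - 2 * q.1.2))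
    = pvSpine l ((i : Int) - 2 * k) := by
  induction l with
  | nil => intro k i; simp [pvCarets, pvSpine]
  | cons p rest ih =>
    intro k i
    by_cases hp : p = "^"
    · simp only [pvCarets, pvSpine, hp, if_pos, List.zip_cons_cons, List.zipIdx_cons,
        List.map_cons, ih]
      congr 1
      · ring
      · congr 1; push_cast; ring
    · simp only [pvCarets, pvSpine, hp, List.zip_cons_cons, List.zipIdx_cons,
        List.map_cons, ih, if_false]
      congr 1
      · ring
      · congr 1; push_cast; ring

-- ===== VERDICT (by name: the statement is the Claim_ definition above) =====
theorem getlistDeep_all_spec : Claim_equal_getlistDeep_all := by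
  intro inputlist _
  unfold Spec_getlistDeep_all getlistDeep_all getlistDeep_all_alt
  rw [pvA_foldl, pvB_spine]
  simp
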